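-- pv_equiv track=rewrite | github.com/johnnyfs/zelda2b | tools/generate_map_preview.py | render_metatile_pixels
-- ===== SOURCE A (Python) =====
-- NES_PALETTE = {
--     0x0F: (0, 0, 0),       # Black
--     0x09: (0, 63, 0),      # Darker green
--     0x19: (0, 120, 0),     # Dark green
--     0x29: (0, 168, 0),     # Medium green
--     0x01: (0, 0, 120),     # Dark blue
--     0x11: (32, 56, 184),   # Medium blue
--     0x21: (60, 120, 248),  # Light blue
--     0x07: (68, 40, 0),     # Dark brown
--     0x17: (120, 68, 0),    # Medium brown
--     0x27: (172, 124, 0),   # Light brown/tan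
--     0x00: (84, 84, 84),    # Dark gray
--     0x10: (152, 152, 152), # Light gray
--     0x30: (252, 252, 252), # White
--     0x38: (248, 216, 120), # Cream/yellow
--     0x06: (120, 0, 0),     # Dark red
--     0x16: (168, 16, 0),    # Red
--     0x08: (68, 40, 0),     # Dark yellow/brown
--     0x28: (216, 168, 0),   # Yellow
--     0x20: (252, 252, 252), # White (alt)
-- }
--
-- BG_PALETTES = [
--     [0x0F, 0x09, 0x19, 0x29],  # BG0: Green (grass/trees)
--     [0x0F, 0x01, 0x11, 0x21],  # BG1: Blue (water)
--     [0x0F, 0x07, 0x17, 0x27],  # BG2: Brown (dungeon/cave)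
--     [0x0F, 0x00, 0x10, 0x30],  # BG3: UI (gray/white)
-- ]
--
-- def decode_chr_tile(chr_data, tile_idx):
--     """Decode NES CHR tile into 8x8 array of 2-bit pixel values."""
--     offset = tile_idx * 16
--     if offset + 16 > len(chr_data):
--         return [[0]*8 for _ in range(8)]
--
--     pixels = []
--     for row in range(8):
--         lo_byte = chr_data[offset + row]
--         hi_byte = chr_data[offset + 8 + row]
--         row_pixels = []
--         for col in range(8):
--             bit = 7 - col
--             lo_bit = (lo_byte >> bit) & 1
--             hi_bit = (hi_byte >> bit) & 1
--             row_pixels.append((hi_bit << 1) | lo_bit)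
--         pixels.append(row_pixels)
--     return pixels
--
-- def render_metatile_pixels(chr_data, metatile):
--     """Render a 16x16 metatile to pixel array with palette colors."""
--     tl_idx, tr_idx, bl_idx, br_idx, attr = metatile
--     palette_idx = attr & 0x03
--     palette = BG_PALETTES[palette_idx]
--
--     tl = decode_chr_tile(chr_data, tl_idx)
--     tr = decode_chr_tile(chr_data, tr_idx)
--     bl = decode_chr_tile(chr_data, bl_idx)
--     br = decode_chr_tile(chr_data, br_idx)
--
--     pixels = []
--     for row in range(16):
--         row_pixels = []
--         if row < 8:
--             for col in range(16):
--                 if col < 8: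
--                     c = tl[row][col]
--                 else:
--                     c = tr[row][col-8]
--                 nes_col = palette[c]
--                 row_pixels.append(NES_PALETTE.get(nes_col, (0,0,0)))
--         else:
--             for col in range(16):
--                 if col < 8:
--                     c = bl[row-8][col]
--                 else:
--                     c = br[row-8][col-8]
--                 nes_col = palette[c]
--                 row_pixels.append(NES_PALETTE.get(nes_col, (0,0,0)))
--         pixels.append(row_pixels)
--     return pixels
-- ===== SOURCE B (Python) =====
-- NES_PALETTE = {
--     0x0F: (0, 0, 0),
--     0x09: (0, 63, 0),
--     0x19: (0, 120, 0),
--     0x29: (0, 168, 0),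
--     0x01: (0, 0, 120),
--     0x11: (32, 56, 184),
--     0x21: (60, 120, 248),
--     0x07: (68, 40, 0),
--     0x17: (120, 68, 0),
--     0x27: (172, 124, 0),
--     0x00: (84, 84, 84),
--     0x10: (152, 152, 152),
--     0x30: (252, 252, 252),
--     0x38: (248, 216, 120),
--     0x06: (120, 0, 0),
--     0x16: (168, 16, 0),
--     0x08: (68, 40, 0),
--     0x28: (216, 168, 0),
--     0x20: (252, 252, 252),
-- }
--
-- BG_PALETTES = [
--     [0x0F, 0x09, 0x19, 0x29],
--     [0x0F, 0x01, 0x11, 0x21],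
--     [0x0F, 0x07, 0x17, 0x27],
--     [0x0F, 0x00, 0x10, 0x30],
-- ]
--
--
-- def tile_row_bytes(chr_data, tile_idx, r):
--     """The (lo, hi) bitplane bytes of scanline r of a CHR tile; (0, 0) past the data."""
--     offset = tile_idx * 16
--     if offset + 16 > len(chr_data):
--         return 0, 0
--     return chr_data[offset + r], chr_data[offset + 8 + r]
--
--
-- def render_metatile_pixels(chr_data, metatile):
--     """Render a 16x16 metatile to pixel array with palette colors.
--
--     No intermediate 8x8 tile arrays: a 4-entry RGB lookup table is built once
--     from the palette, then each output scanline is produced directly from the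
--     two bitplane bytes of its left and right tile rows, fusing decode and
--     coloring into a single pass.
--     """
--     tl_idx, tr_idx, bl_idx, br_idx, attr = metatile
--     lut = [NES_PALETTE.get(c, (0, 0, 0)) for c in BG_PALETTES[attr & 0x03]]
--
--     def scan(idx, r):
--         lo, hi = tile_row_bytes(chr_data, idx, r)
--         return [lut[(((hi >> (7 - c)) & 1) << 1) | ((lo >> (7 - c)) & 1)]
--                 for c in range(8)]
--
--     return [scan(tl_idx, r) + scan(tr_idx, r) for r in range(8)] + \
--            [scan(bl_idx, r) + scan(br_idx, r) for r in range(8)]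
-- ===== Notes on version B (the rewrite author's own statement) =====
-- stated objective: simpler
-- what changed: B eliminates A's decode_chr_tile stage entirely: instead of decoding four full 8x8 pixel-value arrays and then walking a 16x16 grid with per-pixel quadrant branches and a dict lookup per pixel, B builds the 4-entry RGB lookup table once from the palette and emits each output scanline directly from the two bitplane bytes of the corresponding tile row, fusing decode and coloring into one pass with no intermediate tile arrays.
import Mathlib
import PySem

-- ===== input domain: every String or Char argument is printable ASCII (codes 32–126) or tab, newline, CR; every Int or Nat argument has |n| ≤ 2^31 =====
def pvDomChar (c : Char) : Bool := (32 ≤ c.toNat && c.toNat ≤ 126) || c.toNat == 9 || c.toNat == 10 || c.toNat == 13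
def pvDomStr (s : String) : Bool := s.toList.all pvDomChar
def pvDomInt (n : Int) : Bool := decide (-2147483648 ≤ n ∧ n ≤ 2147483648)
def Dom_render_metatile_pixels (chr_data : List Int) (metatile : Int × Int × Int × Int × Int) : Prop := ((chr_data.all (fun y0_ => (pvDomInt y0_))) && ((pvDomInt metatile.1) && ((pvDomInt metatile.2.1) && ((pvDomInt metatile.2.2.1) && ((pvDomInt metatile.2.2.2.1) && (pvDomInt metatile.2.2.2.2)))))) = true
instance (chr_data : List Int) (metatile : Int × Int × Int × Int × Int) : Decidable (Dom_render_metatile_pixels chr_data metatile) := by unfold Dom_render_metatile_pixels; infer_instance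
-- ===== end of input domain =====

-- B skips A's intermediate 8x8 tile arrays and per-pixel quadrant branching: it builds a
-- 4-entry RGB lookup table once and emits each scanline directly from its two bitplane
-- bytes (simpler decomposition, same fixed-size work).


-- ===== PORT A =====
-- NES_PALETTE (a dict literal) as a PySem.Dict; shared by both ports like the module constant.
def nesPalette : PySem.Dict Int (Int × Int × Int) := PySem.Dict.ofList
  [(0x0F, (0, 0, 0)), (0x09, (0, 63, 0)), (0x19, (0, 120, 0)), (0x29, (0, 168, 0)),
   (0x01, (0, 0, 120)), (0x11, (32, 56, 184)), (0x21, (60, 120, 248)),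
   (0x07, (68, 40, 0)), (0x17, (120, 68, 0)), (0x27, (172, 124, 0)),
   (0x00, (84, 84, 84)), (0x10, (152, 152, 152)), (0x30, (252, 252, 252)),
   (0x38, (248, 216, 120)), (0x06, (120, 0, 0)), (0x16, (168, 16, 0)),
   (0x08, (68, 40, 0)), (0x28, (216, 168, 0)), (0x20, (252, 252, 252))]

def bgPalettes : List (List Int) :=
  [[0x0F, 0x09, 0x19, 0x29], [0x0F, 0x01, 0x11, 0x21],
   [0x0F, 0x07, 0x17, 0x27], [0x0F, 0x00, 0x10, 0x30]]

-- decode_chr_tile, A's helper.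
-- Python '>>' on Int is Lean '>>>' (arithmetic shift, exact also on negatives);
-- '& 1', '|' are PySem.Int.band/bor (exact on negatives); '<< 1' is '<<< 1'.
-- chr_data[i] is PySem.List.pyGetD _ i 0: inside Pre_ the index is always in Python's
-- valid (possibly negative) range, so the default 0 is never read.
def decodeChrTile (chr_data : List Int) (tile_idx : Int) : List (List Int) :=
  let offset := tile_idx * 16
  if offset + 16 > (chr_data.length : Int) then
    List.replicate 8 (List.replicate 8 (0 : Int))
  else
    (List.range 8).map (fun (row : Nat) =>
      let lo_byte := PySem.List.pyGetD chr_data (offset + (row : Int)) 0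
      let hi_byte := PySem.List.pyGetD chr_data (offset + 8 + (row : Int)) 0
      (List.range 8).map (fun (col : Nat) =>
        let bit := 7 - col
        let lo_bit := PySem.Int.band (lo_byte >>> bit) 1
        let hi_bit := PySem.Int.band (hi_byte >>> bit) 1
        PySem.Int.bor (hi_bit <<< 1) lo_bit))

-- Port of A: 16-row loop, each row a 16-column loop branching on the quadrant.
-- attr & 0x03 is PySem.Int.band attr 3 (in 0..3 also for negative attr, as in Python);
-- BG_PALETTES[...] and palette[c] are always in range, so pyGetD's default is never read.
def render_metatile_pixels (chr_data : List Int) (metatile : Int × Int × Int × Int × Int) : List (List (Int × Int × Int)) :=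
  match metatile with
  | (tl_idx, tr_idx, bl_idx, br_idx, attr) =>
    let palette := PySem.List.pyGetD bgPalettes (PySem.Int.band attr 3) []
    let tl := decodeChrTile chr_data tl_idx
    let tr := decodeChrTile chr_data tr_idx
    let bl := decodeChrTile chr_data bl_idx
    let br := decodeChrTile chr_data br_idx
    (List.range 16).map (fun (row : Nat) =>
      if row < 8 then
        (List.range 16).map (fun (col : Nat) =>
          let c := if col < 8 then
              PySem.List.pyGetD (PySem.List.pyGetD tl (row : Int) []) (col : Int) 0
            else
              PySem.List.pyGetD (PySem.List.pyGetD tr (row : Int) []) ((col : Int) - 8) 0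
          let nes_col := PySem.List.pyGetD palette c 0
          PySem.Dict.getD nesPalette nes_col (0, 0, 0))
      else
        (List.range 16).map (fun (col : Nat) =>
          let c := if col < 8 then
              PySem.List.pyGetD (PySem.List.pyGetD bl ((row : Int) - 8) []) (col : Int) 0
            else
              PySem.List.pyGetD (PySem.List.pyGetD br ((row : Int) - 8) []) ((col : Int) - 8) 0
          let nes_col := PySem.List.pyGetD palette c 0
          PySem.Dict.getD nesPalette nes_col (0, 0, 0)))

-- ===== PORT B =====
-- tile_row_bytes, B's helper: the (lo, hi) bitplane bytes of scanline r; (0, 0) past the data.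
def tileRowBytes (chr_data : List Int) (tile_idx : Int) (r : Nat) : Int × Int :=
  let offset := tile_idx * 16
  if offset + 16 > (chr_data.length : Int) then (0, 0)
  else (PySem.List.pyGetD chr_data (offset + (r : Int)) 0,
        PySem.List.pyGetD chr_data (offset + 8 + (r : Int)) 0)

-- Port of B: a 4-entry RGB lookup table built once, then each scanline emitted directly
-- from its two bitplane bytes; the grid is top-half ++ bottom-half of row concatenations.
def render_metatile_pixels_alt (chr_data : List Int) (metatile : Int × Int × Int × Int × Int) : List (List (Int × Int × Int)) :=
  match metatile with
  | (tl_idx, tr_idx, bl_idx, br_idx, attr) =>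
    let lut := (PySem.List.pyGetD bgPalettes (PySem.Int.band attr 3) []).map
      (fun c => PySem.Dict.getD nesPalette c (0, 0, 0))
    let scan := fun (idx : Int) (r : Nat) =>
      let lh := tileRowBytes chr_data idx r
      (List.range 8).map (fun (c : Nat) =>
        PySem.List.pyGetD lut
          (PySem.Int.bor (PySem.Int.band (lh.2 >>> (7 - c)) 1 <<< 1)
                         (PySem.Int.band (lh.1 >>> (7 - c)) 1)) (0, 0, 0))
    ((List.range 8).map (fun r => scan tl_idx r ++ scan tr_idx r)) ++
      ((List.range 8).map (fun r => scan bl_idx r ++ scan br_idx r))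

-- ===== PRECONDITION & SPEC =====
-- Pre_ excludes exactly the inputs where Python raises IndexError: a tile index whose
-- offset passes the bounds guard yet reaches below -len(chr_data) (both A and B raise there).
def tileIdxOK (len idx : Int) : Prop := ¬ (idx * 16 + 16 ≤ len ∧ idx * 16 < -len)

def Pre_render_metatile_pixels (chr_data : List Int) (metatile : Int × Int × Int × Int × Int) : Prop :=
  tileIdxOK (chr_data.length : Int) metatile.1 ∧
  tileIdxOK (chr_data.length : Int) metatile.2.1 ∧
  tileIdxOK (chr_data.length : Int) metatile.2.2.1 ∧
  tileIdxOK (chr_data.length : Int) metatile.2.2.2.1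

instance (chr_data : List Int) (metatile : Int × Int × Int × Int × Int) : Decidable (Pre_render_metatile_pixels chr_data metatile) := by
  unfold Pre_render_metatile_pixels tileIdxOK; infer_instance

def pvWitness_render_metatile_pixels : List Int × (Int × Int × Int × Int × Int) :=
  ([1, 2, 3, 4, 5, 6, 7, 8, 9, 10, 11, 12, 13, 14, 15, 16], (0, 0, 0, 0, 0))

def Spec_render_metatile_pixels (chr_data : List Int) (metatile : Int × Int × Int × Int × Int) (out : List (List (Int × Int × Int))) : Prop := out = render_metatile_pixels_alt chr_data metatile
instance (chr_data : List Int) (metatile : Int × Int × Int × Int × Int) (out : List (List (Int × Int × Int))) : Decidable (Spec_render_metatile_pixels chr_data metatile out) := by unfold Spec_render_metatile_pixels; infer_instance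

-- ===== CLAIM (what is proved, stated in full; the proofs are below) =====
def Claim_equal_render_metatile_pixels : Prop := ∀ (chr_data : List Int) (metatile : Int × Int × Int × Int × Int), Dom_render_metatile_pixels chr_data metatile → Pre_render_metatile_pixels chr_data metatile → Spec_render_metatile_pixels chr_data metatile (render_metatile_pixels chr_data metatile)

-- ===== LEMMAS AND PROOFS =====

-- The 2-bit pixel value of column c of a scanline with bitplane bytes lo, hi.
def pixAt (lo hi : Int) (c : Nat) : Int :=
  PySem.Int.bor (PySem.Int.band (hi >>> (7 - c)) 1 <<< 1) (PySem.Int.band (lo >>> (7 - c)) 1)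

-- An 8x8 tile generated by a function of (row, col).
def tileOfFun (F : Nat → Nat → Int) : List (List Int) :=
  (List.range 8).map (fun r => (List.range 8).map (fun c => F r c))

theorem bit01 (x : Int) : PySem.Int.band x 1 = 0 ∨ PySem.Int.band x 1 = 1 := by
  rw [PySem.Int.band_one]
  have h1 := PySem.Int.mod_nonneg x (b := 2) (by norm_num)
  have h2 := PySem.Int.mod_lt x (b := 2) (by norm_num)
  omega

theorem pix_mem (lo hi : Int) (c : Nat) :
    pixAt lo hi c = 0 ∨ pixAt lo hi c = 1 ∨ pixAt lo hi c = 2 ∨ pixAt lo hi c = 3 := by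
  unfold pixAt
  rcases bit01 (hi >>> (7 - c)) with h1 | h1 <;> rcases bit01 (lo >>> (7 - c)) with h0 | h0 <;>
    rw [h1, h0] <;> decide

theorem band3 (x : Int) : PySem.Int.band x 3 = x % 4 := by
  have key : ∀ n : Nat, n &&& 3 = n % 4 := by
    intro n; have := Nat.and_two_pow_sub_one_eq_mod n 2; norm_num at this; omega
  have h3 : Int.toNat 3 = 3 := rfl
  unfold PySem.Int.band
  by_cases h : (0 : Int) ≤ x
  · rw [if_pos h, if_pos (by norm_num), h3, key]; omega
  · rw [if_neg h, if_pos (by norm_num), h3, Nat.and_comm, key]; omega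

-- attr & 3 selects one of the four palettes: the selected palette is some 4-element list.
theorem pal_shape (attr : Int) :
    ∃ a b c d : Int, PySem.List.pyGetD bgPalettes (PySem.Int.band attr 3) [] = [a, b, c, d] := by
  have h := band3 attr
  have : PySem.Int.band attr 3 = 0 ∨ PySem.Int.band attr 3 = 1 ∨
      PySem.Int.band attr 3 = 2 ∨ PySem.Int.band attr 3 = 3 := by rw [h]; omega
  rcases this with h' | h' | h' | h' <;> rw [h'] <;> exact ⟨_, _, _, _, rfl⟩

-- A's per-pixel coloring equals B's LUT lookup on every 2-bit pixel value.
theorem color_eq (a b c d lo hi : Int) (cc : Nat) :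
    PySem.Dict.getD nesPalette (PySem.List.pyGetD [a, b, c, d] (pixAt lo hi cc) 0) (0, 0, 0) =
    PySem.List.pyGetD ([a, b, c, d].map (fun v => PySem.Dict.getD nesPalette v (0, 0, 0)))
      (pixAt lo hi cc) (0, 0, 0) := by
  rcases pix_mem lo hi cc with h | h | h | h <;> rw [h] <;> rfl

-- decodeChrTile produces the tile of per-scanline bitplane bytes and pixAt.
theorem decode_shape (chr_data : List Int) (idx : Int) :
    decodeChrTile chr_data idx =
      tileOfFun (fun r c => pixAt (tileRowBytes chr_data idx r).1 (tileRowBytes chr_data idx r).2 c) := by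
  by_cases h : idx * 16 + 16 > (chr_data.length : Int)
  · simp only [decodeChrTile, tileRowBytes, tileOfFun, if_pos h]
    decide
  · simp only [decodeChrTile, tileRowBytes, tileOfFun, if_neg h, pixAt]

-- With the palette a 4-element list and each tile given by its scanline bytes,
-- A's 16-row branching grid equals B's LUT grid (the pixel terms coincide; the
-- colorings agree by color_eq).
theorem grid_eq (a b c d : Int) (Ptl Ptr Pbl Pbr : Nat → Int × Int) :
    ((List.range 16).map (fun (row : Nat) =>
      if row < 8 then
        (List.range 16).map (fun (col : Nat) =>
          let cv := if col < 8 then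
              PySem.List.pyGetD (PySem.List.pyGetD (tileOfFun (fun r c => pixAt (Ptl r).1 (Ptl r).2 c)) (row : Int) []) (col : Int) 0
            else
              PySem.List.pyGetD (PySem.List.pyGetD (tileOfFun (fun r c => pixAt (Ptr r).1 (Ptr r).2 c)) (row : Int) []) ((col : Int) - 8) 0
          PySem.Dict.getD nesPalette (PySem.List.pyGetD [a, b, c, d] cv 0) (0, 0, 0))
      else
        (List.range 16).map (fun (col : Nat) =>
          let cv := if col < 8 then
              PySem.List.pyGetD (PySem.List.pyGetD (tileOfFun (fun r c => pixAt (Pbl r).1 (Pbl r).2 c)) ((row : Int) - 8) []) (col : Int) 0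
            else
              PySem.List.pyGetD (PySem.List.pyGetD (tileOfFun (fun r c => pixAt (Pbr r).1 (Pbr r).2 c)) ((row : Int) - 8) []) ((col : Int) - 8) 0
          PySem.Dict.getD nesPalette (PySem.List.pyGetD [a, b, c, d] cv 0) (0, 0, 0)))) =
    (((List.range 8).map (fun r =>
        (List.range 8).map (fun cc => PySem.List.pyGetD ([a, b, c, d].map (fun v => PySem.Dict.getD nesPalette v (0, 0, 0))) (pixAt (Ptl r).1 (Ptl r).2 cc) (0, 0, 0)) ++
        (List.range 8).map (fun cc => PySem.List.pyGetD ([a, b, c, d].map (fun v => PySem.Dict.getD nesPalette v (0, 0, 0))) (pixAt (Ptr r).1 (Ptr r).2 cc) (0, 0, 0)))) ++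
      ((List.range 8).map (fun r =>
        (List.range 8).map (fun cc => PySem.List.pyGetD ([a, b, c, d].map (fun v => PySem.Dict.getD nesPalette v (0, 0, 0))) (pixAt (Pbl r).1 (Pbl r).2 cc) (0, 0, 0)) ++
        (List.range 8).map (fun cc => PySem.List.pyGetD ([a, b, c, d].map (fun v => PySem.Dict.getD nesPalette v (0, 0, 0))) (pixAt (Pbr r).1 (Pbr r).2 cc) (0, 0, 0))))) := by
  have h : (((List.range 8).map (fun r =>
        (List.range 8).map (fun cc => PySem.Dict.getD nesPalette (PySem.List.pyGetD [a, b, c, d] (pixAt (Ptl r).1 (Ptl r).2 cc) 0) (0, 0, 0)) ++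
        (List.range 8).map (fun cc => PySem.Dict.getD nesPalette (PySem.List.pyGetD [a, b, c, d] (pixAt (Ptr r).1 (Ptr r).2 cc) 0) (0, 0, 0)))) ++
      ((List.range 8).map (fun r =>
        (List.range 8).map (fun cc => PySem.Dict.getD nesPalette (PySem.List.pyGetD [a, b, c, d] (pixAt (Pbl r).1 (Pbl r).2 cc) 0) (0, 0, 0)) ++
        (List.range 8).map (fun cc => PySem.Dict.getD nesPalette (PySem.List.pyGetD [a, b, c, d] (pixAt (Pbr r).1 (Pbr r).2 cc) 0) (0, 0, 0))))) =
      (((List.range 8).map (fun r =>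
        (List.range 8).map (fun cc => PySem.List.pyGetD ([a, b, c, d].map (fun v => PySem.Dict.getD nesPalette v (0, 0, 0))) (pixAt (Ptl r).1 (Ptl r).2 cc) (0, 0, 0)) ++
        (List.range 8).map (fun cc => PySem.List.pyGetD ([a, b, c, d].map (fun v => PySem.Dict.getD nesPalette v (0, 0, 0))) (pixAt (Ptr r).1 (Ptr r).2 cc) (0, 0, 0)))) ++
      ((List.range 8).map (fun r =>
        (List.range 8).map (fun cc => PySem.List.pyGetD ([a, b, c, d].map (fun v => PySem.Dict.getD nesPalette v (0, 0, 0))) (pixAt (Pbl r).1 (Pbl r).2 cc) (0, 0, 0)) ++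
        (List.range 8).map (fun cc => PySem.List.pyGetD ([a, b, c, d].map (fun v => PySem.Dict.getD nesPalette v (0, 0, 0))) (pixAt (Pbr r).1 (Pbr r).2 cc) (0, 0, 0))))) := by
    simp only [color_eq]
  exact h

-- ===== VERDICT (by name: the statement is the Claim_ definition above) =====
theorem render_metatile_pixels_spec : Claim_equal_render_metatile_pixels := by
  intro chr_data metatile _ _
  obtain ⟨tl_idx, tr_idx, bl_idx, br_idx, attr⟩ := metatile
  unfold Spec_render_metatile_pixels render_metatile_pixels render_metatile_pixels_alt
  obtain ⟨a, b, c, d, hpal⟩ := pal_shape attr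
  simp only [decode_shape, hpal]
  exact grid_eq a b c d (tileRowBytes chr_data tl_idx) (tileRowBytes chr_data tr_idx)
    (tileRowBytes chr_data bl_idx) (tileRowBytes chr_data br_idx)
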